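-- pv_equiv track=rewrite | github.com/samliddicott/mcpash | src/mctash/lexer.py | _scan_backtick_sub
-- ===== SOURCE A (Python) =====
-- def _scan_backtick_sub(source: str, start: int) -> tuple[str, int]:
--     i = start
--     if not source.startswith("`", start):
--         return source[start:start + 1], start + 1
--     i += 1
--     while i < len(source):
--         ch = source[i]
--         if ch == "\\" and i + 1 < len(source):
--             i += 2
--             continue
--         if ch == "`":
--             i += 1
--             return source[start:i], i
--         i += 1
--     return source[start:i], i
-- ===== SOURCE B (Python) =====
-- def _scan_backtick_sub(source: str, start: int) -> tuple[str, int]: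
--     # Delimiter-jumping scan: instead of walking char by char, repeatedly
--     # str.find the next backtick and decide whether it closes the token by
--     # the parity of the run of backslashes immediately before it (an even
--     # run leaves the backtick unescaped).
--     if not source.startswith("`", start):
--         return source[start:start + 1], start + 1
--     j = start + 1
--     while True:
--         p = source.find("`", j)
--         if p == -1:
--             return source[start:], len(source)
--         k = p - 1
--         while k >= 0 and source[k] == "\\":
--             k -= 1
--         if (p - 1 - k) % 2 == 0:
--             return source[start:p + 1], p + 1
--         j = p + 1
-- ===== Notes on version B (the rewrite author's own statement) =====
-- stated objective: alternative
-- what changed: Replaces the char-by-char scan with its two-char escape skip by a delimiter-jumping loop: repeatedly str.find the next backtick and close on it iff the backslash run immediately before it (counted by a backward scan) has even length.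
-- outside the precondition, e.g. on _scan_backtick_sub('``b', -2): A returns ('', 1), B returns ('`b', 3); on _scan_backtick_sub('`ab', -9): A raises IndexError, B returns ('`', 1)
import Mathlib
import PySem

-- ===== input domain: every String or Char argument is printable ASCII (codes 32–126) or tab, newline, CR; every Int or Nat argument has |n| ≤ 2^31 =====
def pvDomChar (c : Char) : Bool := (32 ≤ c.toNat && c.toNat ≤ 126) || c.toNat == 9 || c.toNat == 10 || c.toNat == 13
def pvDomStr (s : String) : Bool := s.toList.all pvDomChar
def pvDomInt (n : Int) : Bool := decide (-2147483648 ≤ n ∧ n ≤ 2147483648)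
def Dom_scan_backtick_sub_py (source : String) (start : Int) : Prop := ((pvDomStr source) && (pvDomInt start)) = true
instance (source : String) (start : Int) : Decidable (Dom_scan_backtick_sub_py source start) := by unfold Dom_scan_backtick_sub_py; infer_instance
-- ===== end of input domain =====

-- B replaces A's char-by-char scan (with its conditional two-char escape skip) by a
-- delimiter-jumping loop: str.find the next backtick, close on it iff the backslash run
-- just before it has even length (objective: alternative).

-- ===== PORT A =====
-- A's while loop: index i, two-char skip on a backslash that has a successor.
def pvScanALoop (cs : List Char) (start : Nat) (i : Nat) : String × Int :=
  if h : i < cs.length then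
    let ch := cs[i]
    if ch = '\\' ∧ i + 1 < cs.length then
      pvScanALoop cs start (i + 2)
    else if ch = '`' then
      (String.mk ((cs.drop start).take (i + 1 - start)), ((i : Int) + 1))
    else
      pvScanALoop cs start (i + 1)
  else
    (String.mk ((cs.drop start).take (i - start)), (i : Int))
termination_by cs.length - i

def scan_backtick_sub_py (source : String) (start : Int) : String × Int :=
  let cs := source.toList
  let s := start.toNat   -- Pre_ guarantees 0 ≤ start, so this is exact
  if (cs.drop s).take 1 = ['`'] then pvScanALoop cs s (s + 1)
  else (String.mk ((cs.drop s).take 1), start + 1)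

-- ===== PORT B =====
-- Source B's inner backward loop 'k = p-1; while k >= 0 and source[k] == "\\": k -= 1',
-- rendered directly as the count p-1-k of backslashes immediately before p.
def pvRunLen (cs : List Char) : Nat → Nat
  | 0 => 0
  | k + 1 => if cs.getD k ' ' = '\\' then pvRunLen cs k + 1 else 0

-- cited by pvScanBOuter's decreasing_by: a find start past the end yields -1
lemma pvFindFrom_past (cs : List Char) (j : Nat) (h : cs.length < j) :
    PySem.Chars.findFrom cs ['`'] (j : Int) none = -1 := by
  simp [PySem.Chars.findFrom, show ¬((j : Int) < 0) from by omega]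
  intro h1
  exact absurd h1 (by omega)

-- Source B's outer 'while True' loop: p = source.find("`", j); unterminated / close / skip.
def pvScanBOuter (cs : List Char) (start : Nat) (j : Nat) : String × Int :=
  let p := PySem.Chars.findFrom cs ['`'] (j : Int) none
  if hp : p = -1 then
    (String.mk (cs.drop start), (cs.length : Int))
  else
    if pvRunLen cs p.toNat % 2 = 0 then
      (String.mk ((cs.drop start).take (p.toNat + 1 - start)), p + 1)
    else
      pvScanBOuter cs start (p.toNat + 1)
termination_by cs.length - j
decreasing_by
  have hjlen : j ≤ cs.length := by
    by_contra hgt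
    exact hp (pvFindFrom_past cs j (by omega))
  obtain ⟨h1, h2, _⟩ := PySem.Chars.findFrom_natCast_spec cs ['`'] j hjlen hp
  have hplen : p.toNat < cs.length := by
    rcases h2 with ⟨t, ht⟩
    have := congrArg List.length ht
    simp at this
    omega
  have hjp : j ≤ p.toNat := by omega
  omega

def scan_backtick_sub_py_alt (source : String) (start : Int) : String × Int :=
  let cs := source.toList
  let s := start.toNat   -- Pre_ guarantees 0 ≤ start, so this is exact
  if (cs.drop s).take 1 = ['`'] then pvScanBOuter cs s (s + 1)
  else (String.mk ((cs.drop s).take 1), start + 1)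

-- ===== PRECONDITION & SPEC =====
-- Pre_ restricts to the lexer's natural domain 0 ≤ start: on negative start A's value
-- (when it does not raise IndexError) is an accident of Python's negative-index wraparound.
def Pre_scan_backtick_sub_py (source : String) (start : Int) : Prop := 0 ≤ start
instance (source : String) (start : Int) : Decidable (Pre_scan_backtick_sub_py source start) := by unfold Pre_scan_backtick_sub_py; infer_instance

def pvWitness_scan_backtick_sub_py : String × Int := ("`a`", 0)

def Spec_scan_backtick_sub_py (source : String) (start : Int) (out : String × Int) : Prop := out = scan_backtick_sub_py_alt source start
instance (source : String) (start : Int) (out : String × Int) : Decidable (Spec_scan_backtick_sub_py source start out) := by unfold Spec_scan_backtick_sub_py; infer_instance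

-- ===== CLAIM (what is proved, stated in full; the proofs are below) =====
def Claim_equal_scan_backtick_sub_py : Prop := ∀ (source : String) (start : Int), Dom_scan_backtick_sub_py source start → Pre_scan_backtick_sub_py source start → Spec_scan_backtick_sub_py source start (scan_backtick_sub_py source start)

-- ===== LEMMAS AND PROOFS =====

-- A's loop runs to the end when no backtick remains at or after i.
lemma pvScanA_noTick (cs : List Char) (start : Nat) :
    ∀ n i, cs.length - i ≤ n → i ≤ cs.length →
      (∀ m, i ≤ m → (hm : m < cs.length) → cs[m] ≠ '`') →
      pvScanALoop cs start i = (String.mk (cs.drop start), (cs.length : Int)) := by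
  intro n
  induction n with
  | zero =>
    intro i hn hle _
    have : i = cs.length := by omega
    subst this
    rw [pvScanALoop, dif_neg (lt_irrefl _), List.take_of_length_le (by simp)]
  | succ n ih =>
    intro i hn hle hreg
    by_cases hlt : i < cs.length
    · rw [pvScanALoop, dif_pos hlt]
      have hne : cs[i] ≠ '`' := hreg i le_rfl hlt
      by_cases hb : cs[i] = '\\' ∧ i + 1 < cs.length
      · rw [if_pos hb]
        exact ih (i + 2) (by omega) (by omega) (fun m hm h2 => hreg m (by omega) h2)
      · rw [if_neg hb, if_neg hne]
        exact ih (i + 1) (by omega) (by omega) (fun m hm h2 => hreg m (by omega) h2)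
    · have : i = cs.length := by omega
      subst this
      rw [pvScanALoop, dif_neg (lt_irrefl _), List.take_of_length_le (by simp)]

-- The backward backslash count is bounded by any non-backslash position below p.
lemma pvRunLen_le (cs : List Char) (q : Nat) (hq : cs.getD q ' ' ≠ '\\') :
    ∀ p, q < p → pvRunLen cs p ≤ p - q - 1 := by
  intro p
  induction p with
  | zero => omega
  | succ p ih =>
    intro hqp
    by_cases he : q = p
    · subst he
      rw [pvRunLen, if_neg hq]; omega
    · have h1 : q < p := by omega
      rw [pvRunLen]
      split_ifs with hb
      · have := ih h1; omega
      · omega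

-- Just below the run (if the run stops inside the list positions) is a non-backslash.
lemma pvRunLen_stop (cs : List Char) : ∀ p, pvRunLen cs p < p → cs.getD (p - 1 - pvRunLen cs p) ' ' ≠ '\\' := by
  intro p
  induction p with
  | zero => intro h; omega
  | succ p ih =>
    intro h
    rw [pvRunLen] at h ⊢
    split_ifs at h ⊢ with hb
    · have he : p + 1 - 1 - (pvRunLen cs p + 1) = p - 1 - pvRunLen cs p := by omega
      rw [he]
      exact ih (by omega)
    · simpa using hb

-- Core region lemma: scanning a backtick-free stretch [i, p) with cs[p] = '`',
-- A closes at p iff the backslash run before p, truncated to the stretch, is even.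
lemma pvRegion (cs : List Char) (start : Nat) (p : Nat) (hp : p < cs.length) (hg : cs[p] = '`') :
    ∀ n i, p - i ≤ n → i ≤ p →
      (∀ m, i ≤ m → m < p → cs.getD m ' ' ≠ '`') →
      pvScanALoop cs start i =
        (if min (pvRunLen cs p) (p - i) % 2 = 0
         then (String.mk ((cs.drop start).take (p + 1 - start)), ((p : Int) + 1))
         else pvScanALoop cs start (p + 1)) := by
  intro n
  induction n with
  | zero =>
    intro i hn hip _
    have : i = p := by omega
    subst this
    rw [pvScanALoop, dif_pos hp]
    have hnb : ¬(cs[i] = '\\' ∧ i + 1 < cs.length) := by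
      rintro ⟨h1, _⟩; rw [hg] at h1; exact absurd h1 (by decide)
    rw [if_neg hnb, if_pos hg]
    simp
  | succ n ih =>
    intro i hn hip hreg
    by_cases hie : i = p
    · subst hie
      rw [pvScanALoop, dif_pos hp]
      have hnb : ¬(cs[i] = '\\' ∧ i + 1 < cs.length) := by
        rintro ⟨h1, _⟩; rw [hg] at h1; exact absurd h1 (by decide)
      rw [if_neg hnb, if_pos hg]
      simp
    · have hilt : i < p := by omega
      have hil : i < cs.length := by omega
      have hgd : cs.getD i ' ' = cs[i] := by
        simp [List.getD_eq_getElem?_getD, List.getElem?_eq_getElem hil]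
      have hne : cs[i] ≠ '`' := by
        have := hreg i le_rfl hilt; rwa [hgd] at this
      rw [pvScanALoop, dif_pos hil]
      by_cases hb : cs[i] = '\\'
      · have hsucc : i + 1 < cs.length := by omega
        rw [if_pos ⟨hb, hsucc⟩]
        by_cases hstep : i + 1 = p
        · -- consumed backslash + the backtick: run before p is nonempty, truncated min is 1 (odd)
          have hrun : 1 ≤ pvRunLen cs p := by
            rw [show p = i + 1 from hstep.symm, pvRunLen, if_pos (hgd.trans hb)]
            omega
          have : min (pvRunLen cs p) (p - i) = 1 := by omega
          rw [this]
          norm_num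
          rw [show i + 2 = p + 1 from by omega]
        · -- recurse two steps in; the truncated run parity is unchanged
          have hrec := ih (i + 2) (by omega) (by omega) (fun m hm h2 => hreg m (by omega) h2)
          rw [hrec]
          have hpar : min (pvRunLen cs p) (p - i) % 2 = min (pvRunLen cs p) (p - (i + 2)) % 2 := by
            have hr1 : pvRunLen cs p ≠ p - i - 1 := by
              intro he
              have hlt : pvRunLen cs p < p := by omega
              have := pvRunLen_stop cs p hlt
              rw [he, show p - 1 - (p - i - 1) = i from by omega, hgd, hb] at this
              exact this rfl
            omega
          rw [hpar]
      · rw [if_neg (by rintro ⟨h1, _⟩; exact hb h1), if_neg hne]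
        have hrec := ih (i + 1) (by omega) (by omega) (fun m hm h2 => hreg m (by omega) h2)
        rw [hrec]
        have hr : pvRunLen cs p ≤ p - i - 1 :=
          pvRunLen_le cs i (by rw [hgd]; exact fun h => hb h) p hilt
        have : min (pvRunLen cs p) (p - i) = min (pvRunLen cs p) (p - (i + 1)) := by omega
        rw [this]

-- A single-char prefix of a drop is exactly a character at that index.
lemma pvPrefix_single (cs : List Char) (m : Nat) :
    ['`'] <+: cs.drop m ↔ ∃ h : m < cs.length, cs[m] = '`' := by
  constructor
  · rintro ⟨t, ht⟩
    have hm : m < cs.length := by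
      have := congrArg List.length ht
      simp at this; omega
    refine ⟨hm, ?_⟩
    rw [List.drop_eq_getElem_cons hm] at ht
    exact (List.cons.injEq _ _ _ _ ▸ ht).1.symm
  · rintro ⟨hm, hc⟩
    rw [List.drop_eq_getElem_cons hm, hc]
    exact ⟨_, rfl⟩

-- Outer correspondence: B's find-and-test loop equals A's scan from j,
-- provided position j-1 holds a backtick (the opener or an escaped backtick).
lemma pvOuter (cs : List Char) (start : Nat) :
    ∀ n j, cs.length - j ≤ n → 1 ≤ j → j ≤ cs.length → cs.getD (j - 1) ' ' = '`' →
      pvScanBOuter cs start j = pvScanALoop cs start j := by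
  intro n
  induction n with
  | zero =>
    intro j hn h1 hjl hbd
    have hje : j = cs.length := by omega
    rw [pvScanBOuter]
    have hfe : PySem.Chars.findFrom cs ['`'] (j : Int) none = -1 := by
      rw [PySem.Chars.findFrom_natCast_eq_neg_one_iff cs ['`'] j hjl]
      rw [hje, List.drop_length]
      simp
    rw [dif_pos hfe]
    exact (pvScanA_noTick cs start cs.length j (by omega) hjl (fun m hm hml => by omega)).symm
  | succ n ih =>
    intro j hn h1 hjl hbd
    rw [pvScanBOuter]
    by_cases hfe : PySem.Chars.findFrom cs ['`'] (j : Int) none = -1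
    · rw [dif_pos hfe]
      rw [PySem.Chars.findFrom_natCast_eq_neg_one_iff cs ['`'] j hjl] at hfe
      refine (pvScanA_noTick cs start cs.length j (by omega) hjl (fun m hm hml hc => ?_)).symm
      have h2 : ['`'] <+: (cs.drop j).drop (m - j) := by
        rw [List.drop_drop, show j + (m - j) = m from by omega]
        exact (pvPrefix_single cs m).mpr ⟨hml, hc⟩
      exact hfe (h2.isInfix.trans (List.drop_suffix _ _).isInfix)
    · rw [dif_neg hfe]
      obtain ⟨hple, hpre, hmin⟩ := PySem.Chars.findFrom_natCast_spec cs ['`'] j hjl hfe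
      set P := PySem.Chars.findFrom cs ['`'] (j : Int) none with hP
      set q := P.toNat with hq
      obtain ⟨hql, hqc⟩ := (pvPrefix_single cs q).mp hpre
      have hPq : P = (q : Int) := (Int.toNat_of_nonneg (by omega)).symm
      have hjq : j ≤ q := by omega
      have hreg : ∀ m, j ≤ m → m < q → cs.getD m ' ' ≠ '`' := by
        intro m hm hmq hc
        have hml : m < cs.length := by omega
        refine hmin m hm hmq ((pvPrefix_single cs m).mpr ⟨hml, ?_⟩)
        rw [List.getD_eq_getElem?_getD, List.getElem?_eq_getElem hml] at hc
        exact hc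
      have hrb : pvRunLen cs q ≤ q - j := by
        have := pvRunLen_le cs (j - 1) (by rw [hbd]; decide) q (by omega)
        omega
      have hA := pvRegion cs start q hql hqc (q - j) j le_rfl hjq hreg
      rw [hA, show min (pvRunLen cs q) (q - j) = pvRunLen cs q from by omega]
      by_cases hpar : pvRunLen cs q % 2 = 0
      · rw [if_pos hpar, if_pos hpar, hPq]
      · rw [if_neg hpar, if_neg hpar]
        refine ih (q + 1) (by omega) (by omega) (by omega) ?_
        simpa [List.getD_eq_getElem?_getD, List.getElem?_eq_getElem hql] using hqc

-- ===== VERDICT =====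
theorem scan_backtick_sub_py_spec : Claim_equal_scan_backtick_sub_py := by
  intro source start _ _
  unfold Spec_scan_backtick_sub_py scan_backtick_sub_py scan_backtick_sub_py_alt
  set cs := source.toList with hcs
  set s := start.toNat with hsn
  by_cases hg : (cs.drop s).take 1 = ['`']
  · simp only [if_pos hg]
    have hslt : s < cs.length := by
      by_contra hge
      rw [List.drop_eq_nil_of_le (by omega)] at hg
      simp at hg
    have hcg : cs[s] = '`' := by
      have h2 := hg
      rw [List.drop_eq_getElem_cons hslt, List.take_succ_cons, List.take_zero] at h2
      simpa using h2
    refine (pvOuter cs s cs.length (s + 1) (by omega) (by omega) (by omega) ?_).symm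
    simpa [List.getD_eq_getElem?_getD, List.getElem?_eq_getElem hslt] using hcg
  · simp only [if_neg hg]
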